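-- pv_equiv track=rewrite | github.com/struktured-labs/obs-twitch-mcp | src/utils/chat_ai.py | _sanitize_output
-- ===== SOURCE A (Python) =====
-- def _sanitize_output(response: str) -> str:
--     """Sanitize AI output before sending to chat."""
--     # Cap length for Twitch (500 char limit)
--     response = response[:450]
--     # Strip anything that looks dangerous
--     for blocked in ["oauth:", "Bearer ", "token=", "/home/", "export ", "import os"]:
--         if blocked.lower() in response.lower():
--             return "I can't share that kind of information."
--     # Strip code blocks
--     response = response.replace("```", "")
--     # Single line only
--     response = response.replace("\n", " ").strip()
--     return response
-- ===== SOURCE B (Python) =====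
-- # B: one fused left-to-right pass driven by a multi-pattern partial-match
-- # automaton (active (token, matched-length) states) that detects all blocked
-- # tokens while simultaneously building the cleaned output (skipping ``` runs,
-- # mapping newlines to spaces), instead of A's six separate substring scans
-- # followed by two whole-string replace passes.
--
-- _BLOCKED = ("oauth:", "bearer ", "token=", "/home/", "export ", "import os")
-- _REFUSAL = "I can't share that kind of information."
--
--
-- def _sanitize_output(response: str) -> str:
--     """Sanitize AI output before sending to chat."""
--     capped = response[:450]
--     states = []   # partial matches: (token, number of chars already matched)
--     out = []
--     skip = 0
--     for i in range(len(capped)):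
--         ch = capped[i]
--         c = ch.lower()
--         nxt = []
--         for tok, k in states:
--             if tok[k] == c:
--                 if k + 1 == len(tok):
--                     return _REFUSAL
--                 nxt.append((tok, k + 1))
--         for tok in _BLOCKED:
--             if tok[0] == c:
--                 nxt.append((tok, 1))
--         states = nxt
--         if skip:
--             skip -= 1
--         elif capped.startswith("```", i):
--             skip = 2
--         elif ch == "\n":
--             out.append(" ")
--         else:
--             out.append(ch)
--     return "".join(out).strip()
-- ===== Notes on version B (the rewrite author's own statement) =====
-- stated objective: alternative
-- what changed: B is a single fused left-to-right pass: a multi-pattern partial-match automaton (a set of (token, matched-length) states advanced per character) detects the blocked tokens while the same loop builds the cleaned output with a skip counter for ``` and newline-to-space mapping, replacing A's six separate substring scans plus two whole-string replace passes.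
import Mathlib
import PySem

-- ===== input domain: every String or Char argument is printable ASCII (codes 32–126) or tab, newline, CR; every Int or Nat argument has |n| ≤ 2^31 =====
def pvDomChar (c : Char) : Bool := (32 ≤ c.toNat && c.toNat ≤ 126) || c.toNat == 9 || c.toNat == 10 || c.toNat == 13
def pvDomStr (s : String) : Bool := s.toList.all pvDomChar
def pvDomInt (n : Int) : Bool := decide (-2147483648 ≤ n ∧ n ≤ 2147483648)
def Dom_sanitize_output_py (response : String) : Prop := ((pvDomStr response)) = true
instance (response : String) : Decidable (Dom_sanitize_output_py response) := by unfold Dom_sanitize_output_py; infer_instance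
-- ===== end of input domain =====

-- B fuses everything into one left-to-right pass driven by a multi-pattern partial-match
-- automaton that detects the blocked tokens while building the cleaned output, instead of
-- A's six separate substring scans followed by two whole-string replace passes (alternative).

-- ===== PORT A =====
def sanitize_output_py (response : String) : String :=
  -- response = response[:450]
  let response := PySem.Str.slice response none (some 450)
  -- for blocked in [...]: if blocked.lower() in response.lower(): return "I can't share ..."
  if ["oauth:", "Bearer ", "token=", "/home/", "export ", "import os"].any
       (fun blocked => PySem.Str.isIn (PySem.Str.lower blocked) (PySem.Str.lower response))
  then "I can't share that kind of information."
  else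
    -- response.replace("```", "").replace("\n", " ").strip()
    PySem.Str.strip (PySem.Str.replace (PySem.Str.replace response "```" "") "\n" " ")

-- ===== PORT B =====
-- _BLOCKED
def pvToksB : List (List Char) :=
  ["oauth:".toList, "bearer ".toList, "token=".toList, "/home/".toList,
   "export ".toList, "import os".toList]

-- the inner 'for tok, k in states' loop: advance the partial matches by one character;
-- 'none' = some token completed (Python's early 'return _REFUSAL')
def pvAdvB : List (List Char × Nat) → Char → Option (List (List Char × Nat))
  | [], _ => some []
  | (tok, k) :: rest, c =>
    if tok[k]? = some c then
      if k + 1 = tok.length then none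
      else
        match pvAdvB rest c with
        | none => none
        | some ns => some ((tok, k + 1) :: ns)
    else pvAdvB rest c

-- the 'for tok in _BLOCKED' loop: start a new partial match at this character
def pvStartB (c : Char) : List (List Char × Nat) :=
  pvToksB.filterMap (fun tok => if tok.head? = some c then some (tok, 1) else none)

-- the main 'for i in range(len(capped))' loop over the remaining characters,
-- carrying (states, skip, reversed output accumulator); 'none' = refusal
def pvLoopB : List Char → List (List Char × Nat) → Nat → List Char → Option (List Char)
  | [], _, _, acc => some acc.reverse
  | ch :: rest, states, skip, acc =>
    match pvAdvB states (PySem.Chars.lowerChar ch) with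
    | none => none
    | some surv =>
      let states' := surv ++ pvStartB (PySem.Chars.lowerChar ch)
      if skip ≠ 0 then pvLoopB rest states' (skip - 1) acc
      else if List.isPrefixOf ['`', '`', '`'] (ch :: rest) then pvLoopB rest states' 2 acc
      else if ch = '\n' then pvLoopB rest states' 0 (' ' :: acc)
      else pvLoopB rest states' 0 (ch :: acc)

def sanitize_output_py_alt (response : String) : String :=
  let capped := PySem.Str.slice response none (some 450)
  match pvLoopB capped.toList [] 0 [] with
  | none => "I can't share that kind of information."
  | some out => String.ofList (PySem.Chars.strip out)

-- ===== PRECONDITION & SPEC =====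
def Spec_sanitize_output_py (response : String) (out : String) : Prop := out = sanitize_output_py_alt response
instance (response : String) (out : String) : Decidable (Spec_sanitize_output_py response out) := by unfold Spec_sanitize_output_py; infer_instance

-- ===== CLAIM (what is proved, stated in full; the proofs are below) =====
def Claim_equal_sanitize_output_py : Prop := ∀ (response : String), Dom_sanitize_output_py response → Spec_sanitize_output_py response (sanitize_output_py response)

-- ===== LEMMAS AND PROOFS =====

-- detection component of the fused loop (proof helper)
def pvDetect : List (List Char × Nat) → List Char → Bool
  | _, [] => false
  | S, ch :: rest =>
    match pvAdvB S (PySem.Chars.lowerChar ch) with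
    | none => true
    | some surv => pvDetect (surv ++ pvStartB (PySem.Chars.lowerChar ch)) rest

-- cleaning component of the fused loop (proof helper)
def pvCleanSkip : List Char → Nat → List Char
  | [], _ => []
  | ch :: rest, skip =>
    if skip ≠ 0 then pvCleanSkip rest (skip - 1)
    else if List.isPrefixOf ['`', '`', '`'] (ch :: rest) then pvCleanSkip rest 2
    else (if ch = '\n' then ' ' else ch) :: pvCleanSkip rest 0

-- the fused loop is detection + cleaning
theorem pvLoopB_split (l : List Char) (S : List (List Char × Nat)) (skip : Nat) (acc : List Char) :
    pvLoopB l S skip acc =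
      if pvDetect S l then none else some (acc.reverse ++ pvCleanSkip l skip) := by
  induction l generalizing S skip acc with
  | nil => simp [pvLoopB, pvDetect, pvCleanSkip]
  | cons ch rest ih =>
    rw [pvLoopB, pvDetect]
    cases h : pvAdvB S (PySem.Chars.lowerChar ch) with
    | none => simp
    | some surv =>
      simp only
      rw [pvCleanSkip]
      simp only [ih]
      by_cases hd : pvDetect (surv ++ pvStartB (PySem.Chars.lowerChar ch)) rest
      · simp [hd]
      · simp only [hd, Bool.false_eq_true, if_false]
        split_ifs <;> simp

-- ----- cleaning = the two replace passes -----

def pvClean0 : List Char → List Char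
  | [] => []
  | c :: t =>
    if List.isPrefixOf ['`', '`', '`'] (c :: t) then pvClean0 (List.drop 2 t)
    else c :: pvClean0 t
termination_by l => l.length
decreasing_by all_goals (simp only [List.length_drop, List.length_cons]; omega)

def pvF (c : Char) : Char := if c = '\n' then ' ' else c

theorem pvGo_tick (fuel : Nat) (l acc : List Char) (h : l.length ≤ fuel) :
    PySem.Chars.replace.go ['`', '`', '`'] [] fuel l acc = acc.reverse ++ pvClean0 l := by
  induction fuel generalizing l acc with
  | zero =>
    have : l = [] := by cases l <;> simp_all
    subst this; simp [PySem.Chars.replace.go, pvClean0]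
  | succ n ih =>
    cases l with
    | nil => simp [PySem.Chars.replace.go, pvClean0]
    | cons c t =>
      rw [PySem.Chars.replace.go]
      by_cases hp : List.isPrefixOf ['`', '`', '`'] (c :: t)
      · rw [pvClean0]
        simp only [hp, if_true]
        have h3 : (List.drop (['`', '`', '`'] : List Char).length (c :: t)).length ≤ n := by
          simp at h ⊢; omega
        rw [ih _ _ h3]
        simp
      · rw [pvClean0]
        simp only [hp]
        have h1 : t.length ≤ n := by simp at h; omega
        rw [ih _ _ h1]
        simp

theorem pvGo_nl (fuel : Nat) (l acc : List Char) (h : l.length ≤ fuel) :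
    PySem.Chars.replace.go ['\n'] [' '] fuel l acc = acc.reverse ++ l.map pvF := by
  induction fuel generalizing l acc with
  | zero =>
    have : l = [] := by cases l <;> simp_all
    subst this; simp [PySem.Chars.replace.go]
  | succ n ih =>
    cases l with
    | nil => simp [PySem.Chars.replace.go]
    | cons c t =>
      rw [PySem.Chars.replace.go]
      have h1 : t.length ≤ n := by simp at h; omega
      by_cases hp : List.isPrefixOf ['\n'] (c :: t)
      · have hc : c = '\n' := by simp [List.isPrefixOf] at hp; exact hp.symm
        simp only [hp, if_true]
        rw [ih _ _ (by simpa using h1)]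
        simp [hc, pvF]
      · have hc : ¬ c = '\n' := by simp [List.isPrefixOf] at hp; exact fun h' => hp h'.symm
        simp only [hp]
        rw [ih _ _ h1]
        simp [pvF, hc]

theorem pvCleanSkip_succ (l : List Char) (n : Nat) :
    pvCleanSkip l (n + 1) = pvCleanSkip l.tail n := by
  cases l with
  | nil => simp [pvCleanSkip]
  | cons c t => rw [pvCleanSkip]; simp

theorem pvCleanSkip_eq_map (l : List Char) : pvCleanSkip l 0 = (pvClean0 l).map pvF := by
  fun_induction pvClean0 l with
  | case1 => simp [pvCleanSkip]
  | case2 c t hp ih =>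
    rw [pvCleanSkip]
    rw [if_neg (by simp), if_pos hp]
    rw [pvCleanSkip_succ, pvCleanSkip_succ]
    have h2 : t.tail.tail = List.drop 2 t := by
      cases t with
      | nil => rfl
      | cons a u => cases u with
        | nil => rfl
        | cons b v => rfl
    rw [h2]
    exact ih
  | case3 c t hp ih =>
    rw [pvCleanSkip]
    simp [hp, ih, pvF]

theorem pvCleanup_eq (l : List Char) :
    PySem.Chars.replace (PySem.Chars.replace l ['`', '`', '`'] []) ['\n'] [' '] = pvCleanSkip l 0 := by
  rw [PySem.Chars.replace, PySem.Chars.replace]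
  simp only [List.isEmpty_cons, if_false, Bool.false_eq_true]
  rw [pvGo_tick _ _ _ (le_refl _), pvGo_nl _ _ _ (le_refl _)]
  simp [pvCleanSkip_eq_map]

-- ----- detection = the substring tests -----

theorem pvToksB_len : ∀ tok ∈ pvToksB, 2 ≤ tok.length := by decide

theorem pvAdvB_none_iff (S : List (List Char × Nat)) (c : Char) :
    pvAdvB S c = none ↔ ∃ p ∈ S, p.1[p.2]? = some c ∧ p.2 + 1 = p.1.length := by
  induction S with
  | nil => simp [pvAdvB]
  | cons q rest ih =>
    obtain ⟨tok, k⟩ := q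
    rw [pvAdvB]
    by_cases h1 : tok[k]? = some c
    · by_cases h2 : k + 1 = tok.length
      · simp [h1, h2]
      · simp only [h1, if_true, h2, if_false]
        cases h : pvAdvB rest c with
        | none => simp [h, ← ih, List.mem_cons]
        | some ns => rw [h] at ih; simp [← ih, h1, h2]
    · simp only [h1, if_false]
      rw [ih]
      constructor
      · rintro ⟨p, hp, h⟩; exact ⟨p, List.mem_cons_of_mem _ hp, h⟩
      · rintro ⟨p, hp, h⟩
        rcases List.mem_cons.mp hp with rfl | hp'
        · exact absurd h.1 h1
        · exact ⟨p, hp', h⟩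

theorem pvAdvB_some_mem (S : List (List Char × Nat)) (c : Char)
    (surv : List (List Char × Nat)) (h : pvAdvB S c = some surv) (q : List Char × Nat) :
    q ∈ surv ↔ ∃ p ∈ S, p.1[p.2]? = some c ∧ p.2 + 1 ≠ p.1.length ∧ q = (p.1, p.2 + 1) := by
  induction S generalizing surv with
  | nil => simp [pvAdvB] at h; subst h; simp
  | cons r rest ih =>
    obtain ⟨tok, k⟩ := r
    rw [pvAdvB] at h
    by_cases h1 : tok[k]? = some c
    · by_cases h2 : k + 1 = tok.length
      · simp [h1, h2] at h
      · simp only [h1, if_true, h2, if_false] at h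
        cases hr : pvAdvB rest c with
        | none => rw [hr] at h; simp at h
        | some ns =>
          rw [hr] at h
          simp only at h
          cases h
          rw [List.mem_cons, ih ns hr]
          constructor
          · rintro (rfl | ⟨p, hp, hc, hn, rfl⟩)
            · exact ⟨(tok, k), List.mem_cons_self, h1, h2, rfl⟩
            · exact ⟨p, List.mem_cons_of_mem _ hp, hc, hn, rfl⟩
          · rintro ⟨p, hp, hc, hn, rfl⟩
            rcases List.mem_cons.mp hp with rfl | hp'
            · exact Or.inl rfl
            · exact Or.inr ⟨p, hp', hc, hn, rfl⟩
    · simp only [h1, if_false] at h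
      rw [ih surv h]
      constructor
      · rintro ⟨p, hp, hc, hn, rfl⟩; exact ⟨p, List.mem_cons_of_mem _ hp, hc, hn, rfl⟩
      · rintro ⟨p, hp, hc, hn, rfl⟩
        rcases List.mem_cons.mp hp with rfl | hp'
        · exact absurd hc h1
        · exact ⟨p, hp', hc, hn, rfl⟩

theorem pvStartB_mem (c : Char) (q : List Char × Nat) :
    q ∈ pvStartB c ↔ ∃ tok ∈ pvToksB, tok.head? = some c ∧ q = (tok, 1) := by
  simp only [pvStartB, List.mem_filterMap]
  constructor
  · rintro ⟨tok, htok, h⟩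
    by_cases hh : tok.head? = some c
    · simp [hh] at h; exact ⟨tok, htok, hh, h.symm⟩
    · simp [hh] at h
  · rintro ⟨tok, htok, hh, rfl⟩
    exact ⟨tok, htok, by simp [hh]⟩

theorem pvDrop_cons (tok : List Char) (k : Nat) (c : Char) (h : tok[k]? = some c) :
    tok.drop k = c :: tok.drop (k + 1) := by
  have hk : k < tok.length := by
    by_contra hk
    rw [List.getElem?_eq_none (by omega)] at h
    simp at h
  have h2 : tok[k] = c := by rwa [List.getElem?_eq_getElem hk, Option.some_inj] at h
  rw [← h2]
  exact (List.getElem_cons_drop hk).symm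

theorem pvDetect_iff (l : List Char) (S : List (List Char × Nat)) :
    pvDetect S l = true ↔
      (∃ p ∈ S, p.1.drop p.2 ≠ [] ∧ p.1.drop p.2 <+: l.map PySem.Chars.lowerChar) ∨
      (∃ tok ∈ pvToksB, ∃ j, tok <+: (l.map PySem.Chars.lowerChar).drop j) := by
  induction l generalizing S with
  | nil =>
    rw [pvDetect]
    simp only [List.map_nil, Bool.false_eq_true, false_iff]
    rintro (⟨p, hp, hne, hpre⟩ | ⟨tok, htok, j, hpre⟩)
    · exact hne (List.prefix_nil.mp hpre)
    · have h2 := pvToksB_len tok htok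
      have h3 : tok = [] := List.prefix_nil.mp (by simpa using hpre)
      subst h3
      simp at h2
  | cons ch rest ih =>
    rw [pvDetect]
    cases h : pvAdvB S (PySem.Chars.lowerChar ch) with
    | none =>
      simp only [true_iff]
      obtain ⟨p, hp, hc, hlen⟩ := (pvAdvB_none_iff S (PySem.Chars.lowerChar ch)).mp h
      left
      refine ⟨p, hp, ?_, ?_⟩
      · rw [pvDrop_cons p.1 p.2 _ hc]; simp
      · rw [pvDrop_cons p.1 p.2 _ hc]
        have hd : p.1.drop (p.2 + 1) = [] := List.drop_eq_nil_of_le (by omega)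
        rw [hd, List.map_cons]
        simp [List.cons_prefix_cons]
    | some surv =>
      simp only
      rw [ih]
      constructor
      · rintro (⟨q, hq, hne, hpre⟩ | ⟨tok, htok, j, hpre⟩)
        · rw [List.mem_append] at hq
          rcases hq with hq | hq
          · obtain ⟨p, hp, hc, hn, rfl⟩ := (pvAdvB_some_mem S _ surv h q).mp hq
            left
            refine ⟨p, hp, ?_, ?_⟩
            · rw [pvDrop_cons p.1 p.2 _ hc]; simp
            · rw [pvDrop_cons p.1 p.2 _ hc, List.map_cons]
              exact List.cons_prefix_cons.mpr ⟨rfl, hpre⟩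
          · obtain ⟨tok, htok, hh, rfl⟩ := (pvStartB_mem _ q).mp hq
            right
            refine ⟨tok, htok, 0, ?_⟩
            have : tok = PySem.Chars.lowerChar ch :: tok.drop 1 := by
              cases tok with
              | nil => simp at hh
              | cons a u => simp at hh ⊢; exact hh
            rw [List.drop_zero, List.map_cons, this]
            exact List.cons_prefix_cons.mpr ⟨rfl, hpre⟩
        · exact Or.inr ⟨tok, htok, j + 1, by simpa using hpre⟩
      · rintro (⟨p, hp, hne, hpre⟩ | ⟨tok, htok, j, hpre⟩)
        · have hk : p.2 < p.1.length := by
            by_contra hk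
            exact hne (List.drop_eq_nil_of_le (by omega))
          have hget : p.1[p.2]? = some p.1[p.2] := List.getElem?_eq_getElem hk
          have hd : p.1.drop p.2 = p.1[p.2] :: p.1.drop (p.2 + 1) :=
            (List.getElem_cons_drop hk).symm
          rw [hd, List.map_cons] at hpre
          obtain ⟨heq, htail⟩ := List.cons_prefix_cons.mp hpre
          have hc : p.1[p.2]? = some (PySem.Chars.lowerChar ch) := by rw [hget, heq]
          have hn : p.2 + 1 ≠ p.1.length := by
            intro hlen
            exact absurd ((pvAdvB_none_iff S _).mpr ⟨p, hp, hc, hlen⟩) (by simp [h])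
          left
          refine ⟨(p.1, p.2 + 1), ?_, ?_, htail⟩
          · exact List.mem_append.mpr (Or.inl
              ((pvAdvB_some_mem S _ surv h _).mpr ⟨p, hp, hc, hn, rfl⟩))
          · intro hnil
            have : p.1.length ≤ p.2 + 1 := List.drop_eq_nil_iff.mp hnil
            omega
        · cases j with
          | zero =>
            have hlen := pvToksB_len tok htok
            rw [List.drop_zero, List.map_cons] at hpre
            cases tok with
            | nil => simp at hlen
            | cons a u =>
              obtain ⟨heq, htail⟩ := List.cons_prefix_cons.mp hpre
              subst heq
              left
              refine ⟨(PySem.Chars.lowerChar ch :: u, 1), ?_, ?_, by simpa using htail⟩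
              · exact List.mem_append.mpr (Or.inr
                  ((pvStartB_mem _ _).mpr ⟨_, htok, by simp, rfl⟩))
              · simp at hlen ⊢
                intro hnil; simp [hnil] at hlen
          | succ j' =>
            exact Or.inr ⟨tok, htok, j', by simpa using hpre⟩

-- A's guard rewritten over pvToksB
theorem pvGuard_eq (L : List Char) :
    (["oauth:", "Bearer ", "token=", "/home/", "export ", "import os"].any
       (fun blocked => PySem.Chars.isIn (PySem.Chars.lower blocked.toList) L)) =
    (pvToksB.any (fun tok => PySem.Chars.isIn tok L)) := by
  have e1 : PySem.Chars.lower "oauth:".toList = "oauth:".toList := by decide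
  have e2 : PySem.Chars.lower "Bearer ".toList = "bearer ".toList := by decide
  have e3 : PySem.Chars.lower "token=".toList = "token=".toList := by decide
  have e4 : PySem.Chars.lower "/home/".toList = "/home/".toList := by decide
  have e5 : PySem.Chars.lower "export ".toList = "export ".toList := by decide
  have e6 : PySem.Chars.lower "import os".toList = "import os".toList := by decide
  simp only [List.any_cons, List.any_nil, pvToksB, e1, e2, e3, e4, e5, e6]

theorem pvDetect_empty (l : List Char) :
    pvDetect [] l = (pvToksB.any (fun tok => PySem.Chars.isIn tok (l.map PySem.Chars.lowerChar))) := by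
  rw [Bool.eq_iff_iff, pvDetect_iff]
  simp only [List.mem_nil_iff, false_and, exists_false, false_or,
    List.any_eq_true]
  constructor
  · rintro ⟨tok, htok, j, hpre⟩
    exact ⟨tok, htok, (PySem.Chars.exists_prefix_drop_iff_isIn tok _).mp ⟨j, hpre⟩⟩
  · rintro ⟨tok, htok, hin⟩
    obtain ⟨j, hpre⟩ := (PySem.Chars.exists_prefix_drop_iff_isIn tok _).mpr hin
    exact ⟨tok, htok, j, hpre⟩

theorem pvMain (r : String) : sanitize_output_py r = sanitize_output_py_alt r := by
  unfold sanitize_output_py sanitize_output_py_alt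
  simp only []
  rw [pvLoopB_split]
  have hlow : ∀ s : String, (PySem.Str.lower s).toList = s.toList.map PySem.Chars.lowerChar := by
    intro s; simp [PySem.Str.lower, PySem.Chars.lower]
  have hguard : (["oauth:", "Bearer ", "token=", "/home/", "export ", "import os"].any
       (fun blocked => PySem.Str.isIn (PySem.Str.lower blocked)
         (PySem.Str.lower (PySem.Str.slice r none (some 450))))) =
      pvDetect [] (PySem.Str.slice r none (some 450)).toList := by
    rw [pvDetect_empty, ← pvGuard_eq]
    simp only [PySem.Str.isIn_eq, hlow, PySem.Chars.lower]
  rw [← hguard]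
  split
  · rfl
  · rw [← pvCleanup_eq]
    simp [PySem.Str.strip, PySem.Str.replace]

-- ===== VERDICT (by name: the statement is the Claim_ definition above) =====
theorem sanitize_output_py_spec : Claim_equal_sanitize_output_py := by
  intro response _
  unfold Spec_sanitize_output_py
  exact pvMain response
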